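-- pv_equiv track=rewrite | github.com/hashnfv/hashnfv-escalator | api/escalator/common/utils.py | translate_marks_4_sed_command
-- ===== SOURCE A (Python) =====
-- def translate_marks_4_sed_command(ori_str):
--     translated_str = ori_str
--     translated_marks = {
--         '/': '\/',
--         '.': '\.',
--         '"': '\\"'}
--     for translated_mark in translated_marks:
--         if translated_str.count(translated_mark):
--             translated_str = translated_str.\
--                 replace(translated_mark, translated_marks[translated_mark])
--     return translated_str
-- ===== SOURCE B (Python) =====
-- def translate_marks_4_sed_command(ori_str):
--     translated_marks = {
--         '/': '\/',
--         '.': '\.',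
--         '"': '\\"'}
--     return ''.join(translated_marks.get(c, c) for c in ori_str)
-- ===== Notes on version B (the rewrite author's own statement) =====
-- stated objective: idiomatic
-- what changed: Replaced three full-string replace passes (one per mark, each preceded by a count scan) with a single left-to-right pass that maps every character through the escape dict and joins the pieces.
import Mathlib
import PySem

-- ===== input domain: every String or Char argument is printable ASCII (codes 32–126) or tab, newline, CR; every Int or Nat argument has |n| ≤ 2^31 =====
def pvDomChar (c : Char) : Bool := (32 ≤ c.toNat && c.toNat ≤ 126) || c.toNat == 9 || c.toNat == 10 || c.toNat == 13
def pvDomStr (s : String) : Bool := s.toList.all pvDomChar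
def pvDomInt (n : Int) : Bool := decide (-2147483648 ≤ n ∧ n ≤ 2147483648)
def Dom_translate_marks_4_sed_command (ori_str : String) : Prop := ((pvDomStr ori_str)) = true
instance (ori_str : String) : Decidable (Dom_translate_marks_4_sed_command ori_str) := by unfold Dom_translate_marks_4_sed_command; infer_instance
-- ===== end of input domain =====

-- B builds the escaped string in one pass over the characters via an escape dict,
-- instead of A's three whole-string replace passes (one per mark); return values proved equal.


-- ===== PORT A =====
-- the module-level dict literal of A (keys in insertion order)
def pvMarksA : PySem.Dict String String :=
  PySem.Dict.ofList [("/", "\\/"), (".", "\\."), ("\"", "\\\"")]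

def translate_marks_4_sed_command (ori_str : String) : String :=
  -- for translated_mark in translated_marks: if translated_str.count(mark): replace(...)
  (PySem.Dict.keys pvMarksA).foldl
    (fun translated_str translated_mark =>
      if PySem.Str.count translated_str translated_mark ≠ 0 then
        PySem.Str.replace translated_str translated_mark
          (pvMarksA.getD translated_mark "")   -- dict lookup; key always present, default unreachable
      else translated_str)
    ori_str

-- ===== PORT B =====
-- the escape dict of B
def pvMarksB : PySem.Dict Char String :=
  PySem.Dict.ofList [('/', "\\/"), ('.', "\\."), ('"', "\\\"")]

def translate_marks_4_sed_command_alt (ori_str : String) : String :=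
  -- ''.join(translated_marks.get(c, c) for c in ori_str)
  PySem.Str.join "" (ori_str.toList.map (fun c => pvMarksB.getD c (String.ofList [c])))

-- ===== PRECONDITION & SPEC =====
def Spec_translate_marks_4_sed_command (ori_str : String) (out : String) : Prop := out = translate_marks_4_sed_command_alt ori_str
instance (ori_str : String) (out : String) : Decidable (Spec_translate_marks_4_sed_command ori_str out) := by unfold Spec_translate_marks_4_sed_command; infer_instance

-- ===== CLAIM (what is proved, stated in full; the proofs are below) =====
def Claim_equal_translate_marks_4_sed_command : Prop := ∀ (ori_str : String), Dom_translate_marks_4_sed_command ori_str → Spec_translate_marks_4_sed_command ori_str (translate_marks_4_sed_command ori_str)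

-- ===== LEMMAS AND PROOFS =====

-- single-character substitution as a flatMap
def pvSub (c : Char) (n : List Char) : Char → List Char :=
  fun x => if x = c then n else [x]

theorem pv_replace_go_single (c : Char) (n : List Char) :
    ∀ (fuel : Nat) (l acc : List Char), l.length ≤ fuel →
      PySem.Chars.replace.go [c] n fuel l acc = acc.reverse ++ l.flatMap (pvSub c n) := by
  intro fuel
  induction fuel with
  | zero =>
    intro l acc h
    have : l = [] := List.eq_nil_of_length_eq_zero (Nat.le_zero.mp h)
    subst this
    simp [PySem.Chars.replace.go]
  | succ m ih =>
    intro l acc h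
    cases l with
    | nil => simp [PySem.Chars.replace.go]
    | cons x t =>
      by_cases hx : x = c
      · subst hx
        have hpre : List.isPrefixOf [x] (x :: t) = true := by simp [List.isPrefixOf]
        have hd : List.drop (List.length ([] : List Char) + 1) (x :: t) = t := by simp
        simp only [PySem.Chars.replace.go, hpre, if_true, hd, List.length_cons] at *
        rw [ih t (n.reverse ++ acc) (by omega)]
        simp [pvSub]
      · have hpre : List.isPrefixOf [c] (x :: t) = false := by
          simp [List.isPrefixOf]
          exact fun h' => absurd h'.symm hx
        simp only [PySem.Chars.replace.go, hpre, Bool.false_eq_true, if_false]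
        rw [ih t (x :: acc) (by simpa using Nat.le_of_succ_le_succ (by simpa using h))]
        simp [pvSub, hx]

theorem pv_replace_single (c : Char) (n : List Char) (l : List Char) :
    PySem.Chars.replace l [c] n = l.flatMap (pvSub c n) := by
  simp only [PySem.Chars.replace, List.isEmpty_cons, Bool.false_eq_true, if_false]
  exact pv_replace_go_single c n l.length l [] (le_refl _)

theorem pv_count_go_single (c : Char) :
    ∀ (fuel : Nat) (l : List Char) (acc : Nat), l.length ≤ fuel →
      PySem.Chars.count.go [c] fuel l acc = acc + l.count c := by
  intro fuel
  induction fuel with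
  | zero =>
    intro l acc h
    have : l = [] := List.eq_nil_of_length_eq_zero (Nat.le_zero.mp h)
    subst this
    simp [PySem.Chars.count.go]
  | succ m ih =>
    intro l acc h
    cases l with
    | nil => simp [PySem.Chars.count.go]
    | cons x t =>
      by_cases hx : x = c
      · subst hx
        have hpre : List.isPrefixOf [x] (x :: t) = true := by simp [List.isPrefixOf]
        have hd : List.drop [x].length (x :: t) = t := by simp
        simp only [PySem.Chars.count.go, hpre, if_true, hd]
        rw [ih t (acc + 1) (by simpa using Nat.le_of_succ_le_succ (by simpa using h))]
        simp
        omega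
      · have hpre : List.isPrefixOf [c] (x :: t) = false := by
          simp [List.isPrefixOf]
          exact fun h' => absurd h'.symm hx
        simp only [PySem.Chars.count.go, hpre, Bool.false_eq_true, if_false]
        rw [ih t acc (by simpa using Nat.le_of_succ_le_succ (by simpa using h))]
        simp [hx]

theorem pv_count_single (c : Char) (l : List Char) :
    PySem.Chars.count l [c] = l.count c := by
  simp only [PySem.Chars.count, List.isEmpty_cons, Bool.false_eq_true, if_false]
  simpa using pv_count_go_single c l.length l 0 (le_refl _)

-- when c does not occur, the substitution is the identity
theorem pv_sub_id (c : Char) (n : List Char) (l : List Char) (h : c ∉ l) :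
    l.flatMap (pvSub c n) = l := by
  induction l with
  | nil => rfl
  | cons x t ih =>
    simp only [List.mem_cons, not_or] at h
    simp [pvSub, Ne.symm h.1, ih h.2]

-- one guarded pass of A, expressed on character lists
theorem pv_pass (c : Char) (n : List Char) (s : String) :
    (if PySem.Str.count s (String.ofList [c]) ≠ 0 then
        PySem.Str.replace s (String.ofList [c]) (String.ofList n)
      else s).toList = s.toList.flatMap (pvSub c n) := by
  by_cases h : PySem.Str.count s (String.ofList [c]) ≠ 0
  · rw [if_pos h, PySem.Str.toList_replace]
    simp only [String.toList_ofList]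
    exact pv_replace_single c n s.toList
  · rw [if_neg h]
    have h : PySem.Str.count s (String.ofList [c]) = 0 := not_ne_iff.mp h
    unfold PySem.Str.count at h
    simp only [String.toList_ofList] at h
    rw [pv_count_single] at h
    exact (pv_sub_id c n s.toList (by simpa [List.count_eq_zero] using h)).symm

-- B's per-character escape, on lists
def pvEsc : Char → List Char :=
  fun c => if c = '/' then ['\\', '/'] else if c = '.' then ['\\', '.'] else
           if c = '"' then ['\\', '"'] else [c]

theorem pv_escB (c : Char) :
    (pvMarksB.getD c (String.ofList [c])).toList = pvEsc c := by
  by_cases h1 : c = '/'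
  · subst h1; rfl
  · by_cases h2 : c = '.'
    · subst h2; rfl
    · by_cases h3 : c = '"'
      · subst h3; rfl
      · have e1 : ('/' == c) = false := by simp [Ne.symm h1]
        have e2 : ('.' == c) = false := by simp [Ne.symm h2]
        have e3 : ('"' == c) = false := by simp [Ne.symm h3]
        simp [pvMarksB, PySem.Dict.getD, PySem.Dict.get?, PySem.Dict.ofList,
              PySem.Dict.update, PySem.Dict.empty, PySem.Dict.insert,
              List.find?, e1, e2, e3, pvEsc, h1, h2, h3]

theorem pv_join_nil (L : List (List Char)) : PySem.Chars.join [] L = L.flatten := by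
  induction L with
  | nil => rfl
  | cons x t ih =>
    cases t with
    | nil => simp [PySem.Chars.join, List.intercalate]
    | cons y u =>
      simp only [PySem.Chars.join, List.intercalate] at *
      simp [List.intersperse, List.flatten] at *
      simpa using ih

-- the three composed substitutions equal B's escape, per character
theorem pv_compose (c : Char) :
    List.flatMap (fun x => List.flatMap (pvSub '"' ['\\', '"']) (pvSub '.' ['\\', '.'] x))
        (pvSub '/' ['\\', '/'] c) = pvEsc c := by
  by_cases h1 : c = '/'
  · subst h1; rfl
  · by_cases h2 : c = '.'
    · subst h2; rfl
    · by_cases h3 : c = '"'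
      · subst h3; rfl
      · simp [pvSub, pvEsc, h1, h2, h3]

-- ===== VERDICT (by name: the statement is the Claim_ definition above) =====
theorem translate_marks_4_sed_command_spec : Claim_equal_translate_marks_4_sed_command := by
  intro s _
  unfold Spec_translate_marks_4_sed_command
  apply String.toList_injective
  -- A side: unfold the three-pass foldl
  have hkeys : PySem.Dict.keys pvMarksA = ["/", ".", "\""] := rfl
  have hg1 : pvMarksA.getD "/" "" = "\\/" := rfl
  have hg2 : pvMarksA.getD "." "" = "\\." := rfl
  have hg3 : pvMarksA.getD "\"" "" = "\\\"" := rfl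
  have hA : (translate_marks_4_sed_command s).toList = s.toList.flatMap pvEsc := by
    unfold translate_marks_4_sed_command
    rw [hkeys]
    simp only [List.foldl, hg1, hg2, hg3]
    have e1 : ("/" : String) = String.ofList ['/'] := rfl
    have e2 : ("." : String) = String.ofList ['.'] := rfl
    have e3 : ("\"" : String) = String.ofList ['"'] := rfl
    have v1 : ("\\/" : String) = String.ofList ['\\', '/'] := rfl
    have v2 : ("\\." : String) = String.ofList ['\\', '.'] := rfl
    have v3 : ("\\\"" : String) = String.ofList ['\\', '"'] := rfl
    rw [e1, e2, e3, v1, v2, v3, pv_pass, pv_pass, pv_pass,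
        List.flatMap_assoc, List.flatMap_assoc]
    exact List.flatMap_congr (fun c _ => pv_compose c)
  have hB : (translate_marks_4_sed_command_alt s).toList = s.toList.flatMap pvEsc := by
    unfold translate_marks_4_sed_command_alt
    rw [PySem.Str.toList_join]
    have : ("" : String).toList = [] := rfl
    rw [this, pv_join_nil, List.map_map, ← List.flatMap_def]
    exact List.flatMap_congr (fun c _ => pv_escB c)
  rw [hA, hB]
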